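-- pv_equiv track=rewrite | github.com/Mir-Abedi/AI-Course-Projects | Bayesian Networks/Sampling/sample.py | choose_row
-- ===== SOURCE A (Python) =====
-- def choose_row(parents, sample):
--     coef = 2**(len(parents) - 1)
--     index = 0
--     for i in parents:
--         if sample[i] == 1:
--             index += coef
--         coef = coef // 2
--     return index
-- ===== SOURCE B (Python) =====
-- def choose_row(parents, sample):
--     bits = "".join("1" if sample[i] == 1 else "0" for i in parents)
--     return int(bits, 2) if bits else 0
-- ===== Notes on version B (the rewrite author's own statement) =====
-- stated objective: idiomatic
-- what changed: Instead of accumulating with a halved place-value coefficient, B renders the parents' bits as a binary string and delegates the place-value arithmetic to int(bits, 2), with 0 for the empty string.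
import Mathlib
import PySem

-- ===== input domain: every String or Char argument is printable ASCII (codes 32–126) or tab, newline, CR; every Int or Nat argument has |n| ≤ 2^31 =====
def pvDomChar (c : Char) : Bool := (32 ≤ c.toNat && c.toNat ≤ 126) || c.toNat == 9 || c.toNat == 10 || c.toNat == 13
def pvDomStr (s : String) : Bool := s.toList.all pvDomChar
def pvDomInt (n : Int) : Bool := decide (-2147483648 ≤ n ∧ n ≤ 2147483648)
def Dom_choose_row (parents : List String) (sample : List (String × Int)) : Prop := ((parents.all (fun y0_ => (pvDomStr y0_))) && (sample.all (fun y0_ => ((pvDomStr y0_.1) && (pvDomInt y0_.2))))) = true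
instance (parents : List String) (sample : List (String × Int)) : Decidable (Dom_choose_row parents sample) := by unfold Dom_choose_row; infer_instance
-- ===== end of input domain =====

-- B renders the parents' bits as a binary numeral string and delegates the place-value
-- arithmetic to the base-2 string parse (Python int(bits, 2)); objective: idiomatic.

-- ===== PORT A =====
-- A's loop: state (coef, index); 'sample[i]' is a dict lookup = first match in the assoc list
-- (KeyError, i.e. no match, is excluded by Pre_; the port reads 0 there, outside the claim).
-- When parents = [] Python's coef is the float 0.5 and is never used; the port's Nat-sub
-- exponent gives coef = 1, equally unused, so the returned index (0) is identical.
def choose_row (parents : List String) (sample : List (String × Int)) : Int :=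
  let coef : Int := 2 ^ (parents.length - 1)
  (parents.foldl
    (fun (st : Int × Int) i =>
      let index := if ((sample.find? (·.1 == i)).map (·.2)).getD 0 == 1 then st.2 + st.1 else st.2
      (PySem.Int.floordiv st.1 2, index))
    (coef, 0)).2

-- ===== PORT B =====
-- int(bits, 2) on a string of '0'/'1' digits is ported as the standard base-2 parse fold.
def pvParseBin (bits : List Char) : Int :=
  bits.foldl (fun acc c => acc * 2 + (if c == '1' then 1 else 0)) 0

def choose_row_alt (parents : List String) (sample : List (String × Int)) : Int :=
  let bits : List Char :=
    parents.map (fun i => if ((sample.find? (·.1 == i)).map (·.2)).getD 0 == 1 then '1' else '0')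
  if bits.isEmpty then 0 else pvParseBin bits

-- ===== PRECONDITION & SPEC =====
-- Pre_ excludes exactly the inputs where Python A raises KeyError: a parent absent from sample.
def Pre_choose_row (parents : List String) (sample : List (String × Int)) : Prop :=
  ∀ i ∈ parents, (sample.map Prod.fst).contains i = true
instance (parents : List String) (sample : List (String × Int)) : Decidable (Pre_choose_row parents sample) := by unfold Pre_choose_row; infer_instance
def pvWitness_choose_row : List String × (List (String × Int)) := (["a", "b"], [("a", 1), ("b", 0)])

def Spec_choose_row (parents : List String) (sample : List (String × Int)) (out : Int) : Prop := out = choose_row_alt parents sample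
instance (parents : List String) (sample : List (String × Int)) (out : Int) : Decidable (Spec_choose_row parents sample out) := by unfold Spec_choose_row; infer_instance

-- ===== CLAIM (what is proved, stated in full; the proofs are below) =====
def Claim_equal_choose_row : Prop := ∀ (parents : List String) (sample : List (String × Int)), Dom_choose_row parents sample → Pre_choose_row parents sample → Spec_choose_row parents sample (choose_row parents sample)

-- ===== LEMMAS AND PROOFS =====

-- the bit read for parent i
def pvBit (sample : List (String × Int)) (i : String) : Int :=
  if ((sample.find? (·.1 == i)).map (·.2)).getD 0 == 1 then 1 else 0

-- the Horner fold over parents that B's parse reduces to (via List.foldl_map)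
lemma hornerB (sample : List (String × Int)) (l : List String) (a : Int) :
    (l.map (fun i => if ((sample.find? (·.1 == i)).map (·.2)).getD 0 == 1 then '1' else '0')).foldl
        (fun acc c => acc * 2 + (if c == '1' then 1 else 0)) a
      = l.foldl (fun acc i => acc * 2 + pvBit sample i) a := by
  induction l generalizing a with
  | nil => simp
  | cons i l ih =>
      simp only [List.map_cons, List.foldl_cons, ih]
      congr 1
      simp only [pvBit]
      split <;> simp

-- the Horner fold shifts its accumulator by 2^length
lemma horner_shift (sample : List (String × Int)) (l : List String) (a : Int) :
    l.foldl (fun index i => index * 2 + pvBit sample i) a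
      = a * 2 ^ l.length + l.foldl (fun index i => index * 2 + pvBit sample i) 0 := by
  induction l generalizing a with
  | nil => simp
  | cons i l ih =>
      simp only [List.foldl_cons, List.length_cons]
      rw [ih (a * 2 + pvBit sample i), ih (0 * 2 + pvBit sample i)]
      ring

lemma fdiv_pow (k : Nat) : PySem.Int.floordiv ((2 : Int) ^ (k + 1)) 2 = 2 ^ k := by
  rw [PySem.Int.floordiv_eq_ediv_of_pos (by norm_num)]
  rw [pow_succ, mul_comm]
  exact Int.mul_ediv_cancel_left _ (by norm_num)

-- A's fold started at coefficient 2^m (m+1 = length) equals idx + Horner value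
lemma mainA (sample : List (String × Int)) :
    ∀ (l : List String) (m : Nat) (idx : Int), l.length = m + 1 →
    (l.foldl
      (fun (st : Int × Int) i =>
        let index := if ((sample.find? (·.1 == i)).map (·.2)).getD 0 == 1 then st.2 + st.1 else st.2
        (PySem.Int.floordiv st.1 2, index))
      ((2 : Int) ^ m, idx)).2
      = idx + l.foldl (fun index i => index * 2 + pvBit sample i) 0 := by
  intro l
  induction l with
  | nil => intro m idx h; simp at h
  | cons i l ih =>
      intro m idx h
      match l, h with
      | [], h =>
          have hm : m = 0 := by simpa using h
          subst hm
          simp only [List.foldl_cons, List.foldl_nil, pvBit]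
          split <;> simp
      | (j :: l'), h =>
          have hm : m = l'.length + 1 := by simp at h; omega
          subst hm
          simp only [List.foldl_cons]
          rw [fdiv_pow]
          have step :
              (if ((sample.find? (·.1 == i)).map (·.2)).getD 0 == 1
                then idx + (2 : Int) ^ (l'.length + 1) else idx)
                = idx + pvBit sample i * 2 ^ (l'.length + 1) := by
            simp only [pvBit]; split <;> ring
          have := ih l'.length
            (if ((sample.find? (·.1 == i)).map (·.2)).getD 0 == 1
              then idx + (2 : Int) ^ (l'.length + 1) else idx) (by simp)
          simp only [List.foldl_cons] at this ⊢
          rw [this, step, horner_shift sample l' (0 * 2 + pvBit sample j),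
            horner_shift sample l' ((0 * 2 + pvBit sample i) * 2 + pvBit sample j)]
          ring

-- ===== VERDICT (by name: the statement is the Claim_ definition above) =====
theorem choose_row_spec : Claim_equal_choose_row := by
  intro parents sample _ _
  unfold Spec_choose_row choose_row choose_row_alt pvParseBin
  cases parents with
  | nil => simp
  | cons i l =>
      have hb := hornerB sample (i :: l) 0
      have h := mainA sample (i :: l) l.length 0 (by simp)
      simp only [pvBit] at h hb
      simp only [List.map_cons, List.isEmpty_cons, Bool.false_eq_true, if_false,
        List.length_cons, Nat.add_sub_cancel]
      simp only [List.map_cons] at hb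
      rw [hb, h]
      ring
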